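-- pv_equiv track=rewrite | github.com/XJ-04561/MetaCanSNPer | MetaCanSNPer/CLI.py | separateCommands
-- ===== SOURCE A (Python) =====
-- def separateCommands(argv : list[str]) -> dict[str,list[str]]:
--
-- 	import itertools
-- 	extraOptionFlags = ["args", "--mapperOptions", "--alignerOptions", "--snpCallerOptions"]
-- 	workList = argv.copy()
-- 	workList[0] = "args"
-- 	proDict = []
-- 	while workList:
-- 		extraOptionFlags.remove(workList[0])
-- 		mode, *args = itertools.takewhile(lambda x:x not in extraOptionFlags, workList)
-- 		proDict.append((mode, args))
-- 		workList = workList[len(args)+1:]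
--
-- 	return dict(proDict)
-- ===== SOURCE B (Python) =====
-- def separateCommands(argv : list[str]) -> dict[str,list[str]]:
-- 	remaining = {"args", "--mapperOptions", "--alignerOptions", "--snpCallerOptions"}
-- 	items = argv.copy()
-- 	items[0] = "args"
-- 	result = {}
-- 	key = None
-- 	current = []
-- 	for x in items:
-- 		if x in remaining:
-- 			remaining.discard(x)
-- 			if key is not None:
-- 				result[key] = current
-- 			key = x
-- 			current = []
-- 		else:
-- 			current.append(x)
-- 	if key is not None:
-- 		result[key] = current
-- 	return result
-- ===== Notes on version B (the rewrite author's own statement) =====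
-- stated objective: simpler
-- what changed: A repeatedly re-slices the work list, scanning each section with itertools.takewhile and a list remove per iteration; B makes one linear pass over the items with a remaining-flag set, a current key and a current section, flushing a section whenever an unseen delimiter flag appears.
import Mathlib
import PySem

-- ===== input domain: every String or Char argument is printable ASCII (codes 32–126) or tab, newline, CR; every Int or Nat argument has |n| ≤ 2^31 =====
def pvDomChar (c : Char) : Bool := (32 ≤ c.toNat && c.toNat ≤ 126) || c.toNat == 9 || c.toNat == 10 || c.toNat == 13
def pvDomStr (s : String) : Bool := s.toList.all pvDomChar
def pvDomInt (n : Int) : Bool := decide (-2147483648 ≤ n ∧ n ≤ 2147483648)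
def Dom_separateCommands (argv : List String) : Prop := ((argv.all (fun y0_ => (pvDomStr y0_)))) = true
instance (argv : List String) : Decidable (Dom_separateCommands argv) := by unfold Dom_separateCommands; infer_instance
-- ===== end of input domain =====

-- B replaces A's repeated takewhile-and-reslice scanning with one linear pass that flushes
-- sections at each still-unseen flag (objective: simpler/idiomatic single pass).

-- ===== PORT A =====
-- the while loop: each iteration removes workList[0] from the remaining flags, takes the
-- section up to the next remaining flag, and re-slices workList past it
def sepLoop : List String → List String → List (String × List String)
  | _, [] => []
  | flags, w0 :: rest =>
    match PySem.List.remove? flags w0 with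
    | none => []   -- ValueError from extraOptionFlags.remove: unreachable from separateCommands
    | some flags' =>
      match (w0 :: rest).takeWhile (fun x => !flags'.contains x) with
      | [] => []   -- 'mode, *args' unpacking of an empty sequence: unreachable (w0 ∉ flags')
      | mode :: args =>
        (mode, args) :: sepLoop flags' ((w0 :: rest).drop (args.length + 1))
termination_by _ wl => wl.length
decreasing_by simp

def separateCommands (argv : List String) : List (String × List String) :=
  -- workList = argv.copy(); workList[0] = "args"  (IndexError on [] is excluded by Pre_)
  let workList := PySem.List.pySetD argv 0 "args"
  -- dict(proDict); workList[len(args)+1:] in sepLoop is List.drop (nonnegative from-slice)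
  (PySem.Dict.ofList (sepLoop ["args", "--mapperOptions", "--alignerOptions", "--snpCallerOptions"] workList)).items

-- ===== PORT B =====
-- the for loop of Source B: remaining flag set, current key (None at start), current section,
-- result dict; flags flush the previous section, other elements are appended to it
def altLoop : PySem.Set String → Option String → List String → PySem.Dict String (List String) →
    List String → PySem.Dict String (List String)
  | _, key, cur, res, [] =>
    (match key with | none => res | some k => res.insert k cur)
  | remaining, key, cur, res, x :: xs =>
    if PySem.Set.contains remaining x then
      altLoop (PySem.Set.discard remaining x) (some x) []
        (match key with | none => res | some k => res.insert k cur) xs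
    else
      altLoop remaining key (cur ++ [x]) res xs

def separateCommands_alt (argv : List String) : List (String × List String) :=
  -- items = argv.copy(); items[0] = "args"  (IndexError on [] is excluded by Pre_)
  let items := PySem.List.pySetD argv 0 "args"
  (altLoop (PySem.Set.ofList ["args", "--mapperOptions", "--alignerOptions", "--snpCallerOptions"])
    none [] PySem.Dict.empty items).items

-- ===== PRECONDITION & SPEC =====
-- Pre_ excludes only the empty argv, on which both A and B raise IndexError at 'workList[0] = "args"'.
def Pre_separateCommands (argv : List String) : Prop := argv ≠ []
instance (argv : List String) : Decidable (Pre_separateCommands argv) := by unfold Pre_separateCommands; infer_instance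
def pvWitness_separateCommands : List String := ["prog", "in.fq", "--mapperOptions", "-x", "7"]

def Spec_separateCommands (argv : List String) (out : List (String × List String)) : Prop := out = separateCommands_alt argv
instance (argv : List String) (out : List (String × List String)) : Decidable (Spec_separateCommands argv out) := by unfold Spec_separateCommands; infer_instance

-- ===== CLAIM (what is proved, stated in full; the proofs are below) =====
def Claim_equal_separateCommands : Prop := ∀ (argv : List String), Dom_separateCommands argv → Pre_separateCommands argv → Spec_separateCommands argv (separateCommands argv)

-- ===== LEMMAS AND PROOFS =====

theorem sepLoop_nil (flags : List String) : sepLoop flags [] = [] := by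
  rw [sepLoop.eq_def]

theorem sepLoop_none {flags : List String} {w0 : String} (rest : List String)
    (h : w0 ∉ flags) : sepLoop flags (w0 :: rest) = [] := by
  rw [sepLoop.eq_def]
  dsimp only
  rw [(PySem.List.remove?_eq_none_iff flags w0).mpr h]

theorem sepLoop_eq (flags : List String) (w0 : String) (rest : List String)
    (hw0 : w0 ∈ flags) (hne : w0 ∉ flags.erase w0) :
    sepLoop flags (w0 :: rest) =
      (w0, rest.takeWhile (fun x => !(flags.erase w0).contains x)) ::
        sepLoop (flags.erase w0)
          (rest.drop (rest.takeWhile (fun x => !(flags.erase w0).contains x)).length) := by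
  rw [sepLoop.eq_def]
  dsimp only
  rw [PySem.List.remove?_eq_some_erase flags w0 hw0]
  have hc : (flags.erase w0).contains w0 = false := by
    simpa [List.contains_eq_mem] using hne
  dsimp only
  rw [List.takeWhile_cons]
  simp [hne, List.drop_succ_cons]

theorem pv_drop_takeWhile {α : Type} (p : α → Bool) (l : List α) :
    l.drop (l.takeWhile p).length = l.dropWhile p := by
  induction l with
  | nil => rfl
  | cons a l ih =>
    by_cases h : p a = true
    · simpa [List.dropWhile_cons, h] using ih
    · simp [List.takeWhile_cons, h]

theorem pv_dropWhile_head {α : Type} (p : α → Bool) (l : List α) {x : α} {xs : List α}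
    (h : l.dropWhile p = x :: xs) : p x = false := by
  induction l with
  | nil => simp at h
  | cons a l ih =>
    by_cases ha : p a = true
    · exact ih (by simpa [List.dropWhile_cons, ha] using h)
    · rw [List.dropWhile_cons] at h
      simp [ha] at h
      simp [← h.1, ha]

-- skipping the non-flag elements of ws accumulates them onto cur
theorem pv_altLoop_skip (ws : List String) (flags : PySem.Set String) (k : String)
    (cur : List String) (res : PySem.Dict String (List String)) :
    altLoop flags (some k) cur res ws =
      altLoop flags (some k) (cur ++ ws.takeWhile (fun x => !PySem.Set.contains flags x)) res
        (ws.dropWhile (fun x => !PySem.Set.contains flags x)) := by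
  induction ws generalizing cur with
  | nil => simp
  | cons x xs ih =>
    by_cases hm : x ∈ flags
    · simp [PySem.Set.contains, List.contains_eq_mem, hm]
    · have hc : PySem.Set.contains flags x = false := by
        simpa [PySem.Set.contains, List.contains_eq_mem] using hm
      rw [show altLoop flags (some k) cur res (x :: xs) = altLoop flags (some k) (cur ++ [x]) res xs
            from by simp [altLoop, PySem.Set.contains, List.contains_eq_mem, hm]]
      rw [ih (cur ++ [x])]
      simp [PySem.Set.contains, List.contains_eq_mem, hm]

theorem pv_contains_false_of_not_mem {d : PySem.Dict String (List String)} {k : String}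
    (h : k ∉ d.keys) : d.contains k = false := by
  unfold PySem.Dict.contains
  rw [List.any_eq_false]
  intro p hp hbe
  apply h
  have hpk : p.1 = k := by simpa using hbe
  unfold PySem.Dict.keys
  rw [List.mem_map]
  exact ⟨p, hp, hpk⟩

theorem pv_insert_fresh (d : PySem.Dict String (List String)) (k : String) (v : List String)
    (h : k ∉ d.keys) : (d.insert k v).items = d.items ++ [(k, v)] := by
  unfold PySem.Dict.insert
  rw [pv_contains_false_of_not_mem h]
  simp

theorem pv_keys_insert_fresh (d : PySem.Dict String (List String)) (k : String) (v : List String)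
    (h : k ∉ d.keys) : (d.insert k v).keys = d.keys ++ [k] := by
  simp [PySem.Dict.keys, pv_insert_fresh d k v h]

-- keys produced by sepLoop: all drawn from flags, pairwise distinct
theorem pv_sepLoop_keys : ∀ (n : Nat) (wl flags : List String), wl.length ≤ n → flags.Nodup →
    (∀ k ∈ (sepLoop flags wl).map Prod.fst, k ∈ flags) ∧ ((sepLoop flags wl).map Prod.fst).Nodup := by
  intro n
  induction n with
  | zero =>
    intro wl flags hlen _
    have : wl = [] := List.length_eq_zero_iff.mp (Nat.le_zero.mp hlen)
    subst this; simp [sepLoop_nil]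
  | succ n ih =>
    intro wl flags hlen hnd
    match wl with
    | [] => simp [sepLoop_nil]
    | w0 :: rest =>
      by_cases hw0 : w0 ∈ flags
      · have hne : w0 ∉ flags.erase w0 := fun hmem =>
          absurd ((List.Nodup.mem_erase_iff hnd).mp hmem).1 (by simp)
        rw [sepLoop_eq flags w0 rest hw0 hne]
        have hlen2 :
            (rest.drop (rest.takeWhile (fun x => !(flags.erase w0).contains x)).length).length ≤ n := by
          have := List.length_drop
            (l := rest) (i := (rest.takeWhile (fun x => !(flags.erase w0).contains x)).length)
          simp only [List.length_cons] at hlen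
          omega
        obtain ⟨hsub, hnodup⟩ := ih _ (flags.erase w0) hlen2 (hnd.erase w0)
        refine ⟨?_, ?_⟩
        · intro k hk
          simp only [List.map_cons, List.mem_cons] at hk
          rcases hk with hk | hk
          · subst hk; exact hw0
          · exact List.mem_of_mem_erase (hsub k hk)
        · simp only [List.map_cons, List.nodup_cons]
          exact ⟨fun hmem => hne (hsub w0 hmem), hnodup⟩
      · rw [sepLoop_none rest hw0]; simp

-- Dict.ofList of a list with distinct keys keeps exactly that items list
theorem pv_update_fresh : ∀ (ps : List (String × List String)) (d : PySem.Dict String (List String)),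
    (ps.map Prod.fst).Nodup → (∀ k ∈ ps.map Prod.fst, k ∉ d.keys) →
    (d.update ps).items = d.items ++ ps := by
  intro ps
  induction ps with
  | nil => intro d _ _; simp [PySem.Dict.update]
  | cons p rest ih =>
    intro d hnd hdis
    obtain ⟨k, v⟩ := p
    have hk : k ∉ d.keys := hdis k (by simp)
    have step : d.update ((k, v) :: rest) = (d.insert k v).update rest := by
      simp [PySem.Dict.update]
    rw [step, ih (d.insert k v) (by simpa using hnd.of_cons)]
    · rw [pv_insert_fresh d k v hk]; simp
    · intro k' hk'
      rw [pv_keys_insert_fresh d k v hk]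
      simp only [List.mem_append, List.mem_singleton]
      rintro (h | h)
      · exact hdis k' (by simp [hk']) h
      · subst h
        simp only [List.map_cons, List.nodup_cons] at hnd
        exact hnd.1 hk'

theorem pv_discard_erase {flags : List String} (hnd : flags.Nodup) (x : String) :
    PySem.Set.discard flags x = flags.erase x := by
  rw [List.Nodup.erase_eq_filter hnd x]
  rfl

-- main invariant: the linear pass, having just consumed the flag w0, appends to res.items
-- exactly the sections A's takewhile-and-reslice loop produces from w0 :: rest
theorem pv_main : ∀ (n : Nat) (rest flags : List String) (w0 : String)
    (res : PySem.Dict String (List String)), rest.length ≤ n → flags.Nodup → w0 ∈ flags →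
    (∀ k ∈ res.keys, k ∉ flags) →
    (altLoop (PySem.Set.discard flags w0) (some w0) [] res rest).items =
      res.items ++ sepLoop flags (w0 :: rest) := by
  intro n
  induction n with
  | zero =>
    intro rest flags w0 res hlen hnd hw0 hdis
    have : rest = [] := List.length_eq_zero_iff.mp (Nat.le_zero.mp hlen)
    subst this
    have hne : w0 ∉ flags.erase w0 := fun hmem =>
      absurd ((List.Nodup.mem_erase_iff hnd).mp hmem).1 (by simp)
    rw [sepLoop_eq flags w0 [] hw0 hne]
    simp only [List.takeWhile_nil, List.length_nil, List.drop_nil, sepLoop_nil]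
    simp only [altLoop]
    rw [pv_insert_fresh res w0 [] (fun h => hdis w0 h hw0)]
  | succ n ih =>
    intro rest flags w0 res hlen hnd hw0 hdis
    have hne : w0 ∉ flags.erase w0 := fun hmem =>
      absurd ((List.Nodup.mem_erase_iff hnd).mp hmem).1 (by simp)
    rw [pv_discard_erase hnd w0]
    -- B side: skip the non-flag elements of the section
    rw [pv_altLoop_skip rest (flags.erase w0) w0 [] res]
    have hfun : (fun x => !PySem.Set.contains (flags.erase w0) x) =
        (fun x => !(flags.erase w0).contains x) := rfl
    rw [hfun]
    -- A side: one iteration of the takewhile-and-reslice loop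
    have hdeq : rest.drop (rest.takeWhile (fun x => !(flags.erase w0).contains x)).length =
        rest.dropWhile (fun x => !(flags.erase w0).contains x) :=
      pv_drop_takeWhile _ rest
    rw [sepLoop_eq flags w0 rest hw0 hne, hdeq]
    rcases hdc : rest.dropWhile (fun x => !(flags.erase w0).contains x) with - | ⟨x, xs⟩
    · simp only [List.nil_append, altLoop, sepLoop_nil]
      rw [pv_insert_fresh res w0 _ (fun h => hdis w0 h hw0)]
    · have hx : (fun x => !(flags.erase w0).contains x) x = false :=
        pv_dropWhile_head _ rest hdc
      have hxmem : x ∈ flags.erase w0 := by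
        simpa [List.contains_eq_mem] using hx
      rw [List.nil_append]
      rw [show altLoop (flags.erase w0) (some w0)
            (rest.takeWhile (fun x => !(flags.erase w0).contains x)) res (x :: xs) =
          altLoop (PySem.Set.discard (flags.erase w0) x) (some x) []
            (res.insert w0 (rest.takeWhile (fun x => !(flags.erase w0).contains x))) xs
          from by simp [altLoop, PySem.Set.contains, List.contains_eq_mem, hxmem]]
      have hlen2 : xs.length ≤ n := by
        have h1 : rest.length =
            (rest.takeWhile (fun x => !(flags.erase w0).contains x)).length + (x :: xs).length := by
          conv_lhs => rw [← List.takeWhile_append_dropWhile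
            (p := fun x => !(flags.erase w0).contains x) (l := rest)]
          rw [hdc]
          simp
        simp only [List.length_cons] at h1 hlen
        omega
      have hkeys : ∀ k ∈ (res.insert w0
          (rest.takeWhile (fun x => !(flags.erase w0).contains x))).keys, k ∉ flags.erase w0 := by
        intro k hk
        rw [pv_keys_insert_fresh res w0 _ (fun h => hdis w0 h hw0)] at hk
        simp only [List.mem_append, List.mem_singleton] at hk
        rcases hk with hk | hk
        · exact fun hmem => hdis k hk (List.mem_of_mem_erase hmem)
        · subst hk; exact hne
      rw [ih xs (flags.erase w0) x _ hlen2 (hnd.erase w0) hxmem hkeys]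
      rw [pv_insert_fresh res w0 _ (fun h => hdis w0 h hw0)]
      rw [List.append_assoc, List.singleton_append]

-- ===== VERDICT (by name: the statement is the Claim_ definition above) =====
theorem separateCommands_spec : Claim_equal_separateCommands := by
  intro argv _ hpre
  unfold Spec_separateCommands separateCommands separateCommands_alt
  match argv with
  | [] => exact absurd rfl hpre
  | a0 :: rest =>
    have hset : PySem.List.pySetD (a0 :: rest) (0 : Int) "args" = "args" :: rest := by
      simp [PySem.List.pySetD, PySem.List.pySet?, PySem.List.pyIdx?]
    simp only [hset]
    have hnd : (["args", "--mapperOptions", "--alignerOptions", "--snpCallerOptions"] :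
        List String).Nodup := by decide
    have hof : PySem.Set.ofList
        (["args", "--mapperOptions", "--alignerOptions", "--snpCallerOptions"] : List String) =
        ["args", "--mapperOptions", "--alignerOptions", "--snpCallerOptions"] :=
      PySem.Set.ofList_eq_self_of_nodup _ hnd
    have hmem : ("args" : String) ∈
        (["args", "--mapperOptions", "--alignerOptions", "--snpCallerOptions"] : List String) := by
      decide
    rw [hof]
    rw [show altLoop (["args", "--mapperOptions", "--alignerOptions", "--snpCallerOptions"] :
          List String) none [] PySem.Dict.empty ("args" :: rest) =
        altLoop (PySem.Set.discard
          (["args", "--mapperOptions", "--alignerOptions", "--snpCallerOptions"] : List String)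
          "args") (some "args") [] PySem.Dict.empty rest
      from by simp [altLoop, PySem.Set.contains, List.contains_eq_mem, hmem]]
    rw [pv_main rest.length rest _ "args" PySem.Dict.empty (le_refl _) hnd hmem
        (by intro k hk; simp [PySem.Dict.empty, PySem.Dict.keys] at hk)]
    obtain ⟨hsub, hnodup⟩ := pv_sepLoop_keys ("args" :: rest).length ("args" :: rest) _
      (le_refl _) hnd
    rw [PySem.Dict.ofList, pv_update_fresh _ PySem.Dict.empty hnodup
        (by intro k _; simp [PySem.Dict.empty, PySem.Dict.keys])]
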